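-- pv_equiv track=rewrite | github.com/Ag3497120/verantyx-v6 | synth_results/794b24be.py | transform
-- ===== SOURCE A (Python) =====
-- def transform(grid):
--     count = sum(v for row in grid for v in row if v == 1)
--     # Order: row 0 left to right, then row 1 center first
--     order = [(0,0),(0,1),(0,2),(1,1),(1,0),(1,2),(2,0),(2,1),(2,2)]
--     result = [[0]*3 for _ in range(3)]
--     for i in range(min(count, len(order))):
--         r, c = order[i]
--         result[r][c] = 2
--     return result
-- ===== SOURCE B (Python) =====
-- def transform(grid):
--     k = min(sum(row.count(1) for row in grid), 9)
--     def fill(n):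
--         return [2] * n + [0] * (3 - n)
--     top = min(k, 3)
--     mid = min(max(k - 3, 0), 3)
--     bot = max(k - 6, 0)
--     middle = [2 if mid >= 2 else 0, 2 if mid >= 1 else 0, 2 if mid >= 3 else 0]
--     return [fill(top), middle, fill(bot)]
-- ===== Notes on version B (the rewrite author's own statement) =====
-- stated objective: alternative
-- what changed: B replaces the position-order list and the fill loop entirely by closed-form arithmetic: it clamps the count of ones to 9, splits it into per-row quotas top=min(k,3), mid=min(max(k-3,0),3), bot=max(k-6,0), and builds each row directly (prefix rows via [2]*n+[0]*(3-n), the middle row from threshold tests encoding its center-first order); the count itself uses row.count(1) per row instead of a conditional sum over all cells.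
import Mathlib
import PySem

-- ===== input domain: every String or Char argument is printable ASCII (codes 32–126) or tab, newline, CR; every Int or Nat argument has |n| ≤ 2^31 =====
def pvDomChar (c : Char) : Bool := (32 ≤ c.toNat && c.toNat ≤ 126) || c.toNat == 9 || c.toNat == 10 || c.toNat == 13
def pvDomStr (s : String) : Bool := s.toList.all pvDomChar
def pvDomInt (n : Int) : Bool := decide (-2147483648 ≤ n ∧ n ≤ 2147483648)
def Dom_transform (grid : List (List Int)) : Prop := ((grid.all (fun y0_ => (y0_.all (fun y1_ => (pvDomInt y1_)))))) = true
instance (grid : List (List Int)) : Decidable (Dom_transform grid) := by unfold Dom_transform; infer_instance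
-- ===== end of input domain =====

-- B drops the order list and fill loop: it clamps the ones-count to 9, splits it into
-- closed-form per-row quotas and builds each of the three rows directly (objective: alternative).

-- ===== PORT A =====
-- result[r][c] = 2 is ported as pySetD on the outer list with the updated row; r, c come from
-- order, so they are always in range and pyGetD's default is never used (exact).
def transform (grid : List (List Int)) : List (List Int) :=
  let count : Int := grid.foldl (fun acc row => row.foldl (fun a v => if v = 1 then a + v else a) acc) 0
  let order : List (Int × Int) := [(0,0),(0,1),(0,2),(1,1),(1,0),(1,2),(2,0),(2,1),(2,2)]
  let result : List (List Int) := [[0,0,0],[0,0,0],[0,0,0]]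
  (PySem.List.pyRange 0 (min count (order.length : Int)) 1).foldl
    (fun res i =>
      match PySem.List.pyGetD order i (0, 0) with
      | (r, c) => PySem.List.pySetD res r (PySem.List.pySetD (PySem.List.pyGetD res r []) c 2))
    result

-- ===== PORT B =====
-- [2]*n in Python repeats max(n,0) times: ported as List.replicate n.toNat (exact).
def pvFill (n : Int) : List Int :=
  List.replicate n.toNat 2 ++ List.replicate (3 - n).toNat 0

def transform_alt (grid : List (List Int)) : List (List Int) :=
  let k : Int := min ((grid.map (fun row => (PySem.List.count row 1 : Int))).sum) 9
  let top := min k 3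
  let mid := min (max (k - 3) 0) 3
  let bot := max (k - 6) 0
  let middle : List Int := [if mid ≥ 2 then 2 else 0, if mid ≥ 1 then 2 else 0, if mid ≥ 3 then 2 else 0]
  [pvFill top, middle, pvFill bot]

-- ===== PRECONDITION & SPEC =====
def Spec_transform (grid : List (List Int)) (out : List (List Int)) : Prop := out = transform_alt grid
instance (grid : List (List Int)) (out : List (List Int)) : Decidable (Spec_transform grid out) := by unfold Spec_transform; infer_instance

-- ===== CLAIM (what is proved, stated in full; the proofs are below) =====
def Claim_equal_transform : Prop := ∀ (grid : List (List Int)), Dom_transform grid → Spec_transform grid (transform grid)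

-- ===== LEMMAS AND PROOFS =====

def pvCount (grid : List (List Int)) : Int :=
  grid.foldl (fun acc row => row.foldl (fun a v => if v = 1 then a + v else a) acc) 0

def pvABody (count : Int) : List (List Int) :=
  let order : List (Int × Int) := [(0,0),(0,1),(0,2),(1,1),(1,0),(1,2),(2,0),(2,1),(2,2)]
  (PySem.List.pyRange 0 (min count (order.length : Int)) 1).foldl
    (fun res i =>
      match PySem.List.pyGetD order i (0, 0) with
      | (r, c) => PySem.List.pySetD res r (PySem.List.pySetD (PySem.List.pyGetD res r []) c 2))
    [[0,0,0],[0,0,0],[0,0,0]]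

def pvBBody (count : Int) : List (List Int) :=
  let k : Int := min count 9
  let top := min k 3
  let mid := min (max (k - 3) 0) 3
  let bot := max (k - 6) 0
  let middle : List Int := [if mid ≥ 2 then 2 else 0, if mid ≥ 1 then 2 else 0, if mid ≥ 3 then 2 else 0]
  [pvFill top, middle, pvFill bot]

lemma pv_row_count (row : List Int) (a : Int) :
    row.foldl (fun a v => if v = 1 then a + v else a) a = a + (PySem.List.count row 1 : Int) := by
  induction row generalizing a with
  | nil => simp [PySem.List.count]
  | cons v t ih =>
    simp only [List.foldl, ih, PySem.List.count_eq, List.count_cons]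
    by_cases h : v = 1 <;> simp [h] <;> omega

lemma pvCount_eq (grid : List (List Int)) :
    pvCount grid = (grid.map (fun row => (PySem.List.count row 1 : Int))).sum := by
  unfold pvCount
  have : ∀ (g : List (List Int)) (a : Int),
      g.foldl (fun acc row => row.foldl (fun a v => if v = 1 then a + v else a) acc) a
        = a + (g.map (fun row => (PySem.List.count row 1 : Int))).sum := by
    intro g
    induction g with
    | nil => intro a; simp
    | cons r t ih =>
      intro a
      rw [List.foldl_cons, pv_row_count, ih, List.map_cons, List.sum_cons]
      ring
  simpa using this grid 0

lemma pvCount_nonneg (grid : List (List Int)) : 0 ≤ pvCount grid := by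
  rw [pvCount_eq]
  apply List.sum_nonneg
  intro x hx
  simp only [List.mem_map] at hx
  obtain ⟨r, _, rfl⟩ := hx
  positivity

lemma pvBody_eq (c : Int) (h : 0 ≤ c) : pvABody c = pvBBody c := by
  obtain ⟨n, rfl⟩ := Int.eq_ofNat_of_zero_le h
  by_cases hn : n ≤ 9
  · interval_cases n <;> decide
  · have h1 : min ((n : Nat) : Int) (9 : Int) = 9 := by omega
    unfold pvABody pvBBody
    simp only [List.length_cons, List.length_nil]
    norm_num [h1]
    decide

theorem transform_eq_body (grid : List (List Int)) : transform grid = pvABody (pvCount grid) := rfl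

theorem transform_alt_eq_body (grid : List (List Int)) :
    transform_alt grid = pvBBody (pvCount grid) := by
  unfold transform_alt pvBBody
  rw [pvCount_eq]

-- ===== VERDICT (by name: the statement is the Claim_ definition above) =====
theorem transform_spec : Claim_equal_transform := by
  intro grid _
  unfold Spec_transform
  rw [transform_eq_body, transform_alt_eq_body]
  exact pvBody_eq _ (pvCount_nonneg grid)
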